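-- pv_equiv track=rewrite | github.com/robertchu1205/system_architect | process-api/src/functions/post_process/integrate/handler.py | set_sort_order
-- ===== SOURCE A (Python) =====
-- def set_sort_order(ans_dict, prior_rule):
--     sort_order = {}
--     for label in ans_dict.keys():
--         if not label in prior_rule["high_priority_label"]:
--             sort_order[label] = 0
--         else:
--             sort_order[label] = len(prior_rule["high_priority_label"]) - \
--                                 prior_rule["high_priority_label"].index(label)
--     return sort_order
-- ===== SOURCE B (Python) =====
-- def set_sort_order(ans_dict, prior_rule):
--     sort_order = dict.fromkeys(ans_dict, 0)
--     rank = 0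
--     for label in reversed(prior_rule["high_priority_label"]):
--         rank += 1
--         if label in sort_order:
--             sort_order[label] = rank
--     return sort_order
-- ===== Notes on version B (the rewrite author's own statement) =====
-- stated objective: faster
-- what changed: Instead of scanning high_priority_label twice per key (membership test plus .index), B first initialises every key's rank to 0 with dict.fromkeys and then makes one pass over reversed(high_priority_label) with an increasing rank counter, overwriting the rank of each label that is a key; the reversed order makes the first occurrence win, matching .index.
-- outside the precondition, e.g. on set_sort_order({}, {}): A returns {}, B raises KeyError
import Mathlib
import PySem

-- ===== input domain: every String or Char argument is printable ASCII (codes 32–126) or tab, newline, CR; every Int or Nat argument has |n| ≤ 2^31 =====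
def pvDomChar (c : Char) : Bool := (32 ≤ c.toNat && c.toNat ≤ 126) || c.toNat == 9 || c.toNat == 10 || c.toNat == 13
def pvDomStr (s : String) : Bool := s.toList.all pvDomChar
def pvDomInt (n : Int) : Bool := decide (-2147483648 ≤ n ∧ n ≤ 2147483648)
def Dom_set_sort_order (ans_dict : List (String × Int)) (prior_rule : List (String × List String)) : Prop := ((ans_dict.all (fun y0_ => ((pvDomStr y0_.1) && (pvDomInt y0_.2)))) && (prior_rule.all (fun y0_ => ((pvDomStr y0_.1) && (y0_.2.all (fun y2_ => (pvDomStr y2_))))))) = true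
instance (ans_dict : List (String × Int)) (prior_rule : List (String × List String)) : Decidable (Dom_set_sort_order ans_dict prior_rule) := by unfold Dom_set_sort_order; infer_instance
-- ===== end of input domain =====

-- B initialises every key's rank to 0, then one pass over reversed(high_priority_label) with a counter overwrites ranks (first occurrence processed last, so it wins): asymptotically faster than A's per-key scans; equal return values.

-- ===== PORT A =====
-- per-key branch: membership scan, then len - .index scan, inserted into the result dict
def set_sort_order (ans_dict : List (String × Int)) (prior_rule : List (String × List String)) : List (String × Int) :=
  match prior_rule.lookup "high_priority_label" with
  | none => []   -- Python raises KeyError here; excluded by Pre_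
  | some hp =>
    (ans_dict.foldl (fun d kv =>
        if ¬ (kv.1 ∈ hp) then d.insert kv.1 0
        else d.insert kv.1 ((hp.length : Int) - (((PySem.List.index? hp kv.1).getD 0 : Nat) : Int)))
      PySem.Dict.empty).items

-- ===== PORT B =====
-- dict.fromkeys(ans_dict, 0), then the reversed-hp loop carrying (sort_order, rank)
def set_sort_order_alt (ans_dict : List (String × Int)) (prior_rule : List (String × List String)) : List (String × Int) :=
  match prior_rule.lookup "high_priority_label" with
  | none => []   -- Python raises KeyError here; excluded by Pre_
  | some hp =>
    let sort_order : PySem.Dict String Int :=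
      ans_dict.foldl (fun d kv => d.insert kv.1 (0 : Int)) PySem.Dict.empty
    (hp.reverse.foldl
      (fun (st : PySem.Dict String Int × Int) label =>
        let rank := st.2 + 1
        (if st.1.contains label then st.1.insert label rank else st.1, rank))
      (sort_order, 0)).1.items

-- ===== PRECONDITION & SPEC =====
-- Pre_ excludes prior_rule lacking the key "high_priority_label": there Python A raises KeyError whenever ans_dict is non-empty, and on an empty ans_dict returns {} only because its loop never reads prior_rule, while B (which reads the key before its loop runs) raises KeyError.
def Pre_set_sort_order (ans_dict : List (String × Int)) (prior_rule : List (String × List String)) : Prop :=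
  "high_priority_label" ∈ prior_rule.map Prod.fst
instance (ans_dict : List (String × Int)) (prior_rule : List (String × List String)) : Decidable (Pre_set_sort_order ans_dict prior_rule) := by unfold Pre_set_sort_order; infer_instance

def pvWitness_set_sort_order : (List (String × Int)) × (List (String × List String)) :=
  ([("cat", 3), ("dog", 1)], [("high_priority_label", ["dog", "bird"])])

def Spec_set_sort_order (ans_dict : List (String × Int)) (prior_rule : List (String × List String)) (out : List (String × Int)) : Prop := out = set_sort_order_alt ans_dict prior_rule
instance (ans_dict : List (String × Int)) (prior_rule : List (String × List String)) (out : List (String × Int)) : Decidable (Spec_set_sort_order ans_dict prior_rule out) := by unfold Spec_set_sort_order; infer_instance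

-- ===== CLAIM (what is proved, stated in full; the proofs are below) =====
def Claim_equal_set_sort_order : Prop := ∀ (ans_dict : List (String × Int)) (prior_rule : List (String × List String)), Dom_set_sort_order ans_dict prior_rule → Pre_set_sort_order ans_dict prior_rule → Spec_set_sort_order ans_dict prior_rule (set_sort_order ans_dict prior_rule)

-- ===== LEMMAS AND PROOFS =====

-- B's patch loop, abstracted: the step function of the reversed-hp fold
def pvStep (st : PySem.Dict String Int × Int) (label : String) : PySem.Dict String Int × Int :=
  (if st.1.contains label then st.1.insert label (st.2 + 1) else st.1, st.2 + 1)

-- rank the LAST occurrence of k in l would receive, counting from r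
def pvLastRank (l : List String) (k : String) (r : Int) : Option Int :=
  match l with
  | [] => none
  | x :: xs =>
    match pvLastRank xs k (r + 1) with
    | some v => some v
    | none => if k = x then some (r + 1) else none

lemma pvStep_getD (l : List String) : ∀ (d : PySem.Dict String Int) (r : Int) (k : String),
    (l.foldl pvStep (d, r)).1.getD k 0 =
      if d.contains k = true then
        (match pvLastRank l k r with
         | some v => v
         | none => d.getD k 0)
      else d.getD k 0 := by
  induction l with
  | nil =>
    intro d r k
    simp only [List.foldl_nil, pvLastRank]
    split_ifs <;> rfl
  | cons x xs ih =>
    intro d r k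
    rw [List.foldl_cons,
        show pvStep (d, r) x = (if d.contains x then d.insert x (r + 1) else d, r + 1) from rfl,
        show pvLastRank (x :: xs) k r =
          (match pvLastRank xs k (r + 1) with
           | some v => some v
           | none => if k = x then some (r + 1) else none) from rfl]
    by_cases hcx : d.contains x = true
    · rw [if_pos hcx, ih]
      have hck : (d.insert x (r + 1)).contains k = d.contains k := by
        rw [PySem.Dict.contains_insert]
        by_cases hk : k = x
        · subst hk; simp [hcx]
        · simp [show (k == x) = false from by simp [hk]]
      rw [hck]
      by_cases hc : d.contains k = true
      · rw [if_pos hc, if_pos hc]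
        cases h : pvLastRank xs k (r + 1) with
        | some v => simp
        | none =>
          simp only []
          by_cases hk : k = x
          · subst hk
            simp
          · simp [PySem.Dict.getD_insert, hk]
      · rw [if_neg hc, if_neg hc]
        by_cases hk : k = x
        · subst hk; rw [hcx] at hc; exact absurd rfl hc
        · simp [PySem.Dict.getD_insert, hk]
    · rw [if_neg hcx, ih]
      by_cases hc : d.contains k = true
      · rw [if_pos hc, if_pos hc]
        cases h : pvLastRank xs k (r + 1) with
        | some v => simp
        | none =>
          simp only []
          by_cases hk : k = x
          · subst hk; exact absurd hc hcx
          · simp [if_neg hk]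
      · rw [if_neg hc, if_neg hc]

lemma pvLastRank_append (a b : List String) : ∀ (k : String) (r : Int),
    pvLastRank (a ++ b) k r =
      (match pvLastRank b k (r + a.length) with
       | some v => some v
       | none => pvLastRank a k r) := by
  induction a with
  | nil =>
    intro k r
    simp only [List.nil_append, List.length_nil, Int.natCast_zero, add_zero]
    cases pvLastRank b k r <;> rfl
  | cons x xs ih =>
    intro k r
    rw [List.cons_append]
    show (match pvLastRank (xs ++ b) k (r + 1) with
          | some v => some v
          | none => if k = x then some (r + 1) else none) = _
    rw [ih]
    have hlen : r + 1 + (xs.length : Int) = r + ((x :: xs).length : Int) := by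
      simp [List.length_cons]; ring
    rw [hlen]
    cases hb : pvLastRank b k (r + ((x :: xs).length : Int)) with
    | some v => rfl
    | none =>
      simp only []
      rfl

lemma pvLastRank_reverse (l : List String) : ∀ (k : String) (r : Int),
    pvLastRank l.reverse k r =
      (PySem.List.index? l k).map (fun i : Nat => r + ((l.length : Int) - (i : Int))) := by
  induction l with
  | nil =>
    intro k r
    rw [show PySem.List.index? ([] : List String) k = none from
      (PySem.List.index?_eq_none_iff _ _).mpr (by simp)]
    rfl
  | cons x xs ih =>
    intro k r
    rw [List.reverse_cons, pvLastRank_append, ih]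
    by_cases hk : k = x
    · subst hk
      rw [PySem.List.index?_cons_self,
          show pvLastRank [k] k (r + (xs.reverse.length : Int)) =
            some (r + (xs.reverse.length : Int) + 1) from by simp [pvLastRank]]
      simp only [Option.map_some, List.length_reverse, List.length_cons]
      congr 1
      push_cast
      ring
    · rw [show pvLastRank [x] k (r + (xs.reverse.length : Int)) = none from by
          simp [pvLastRank, hk],
        PySem.List.index?_cons_of_ne _ (fun he => hk he.symm)]
      cases h : PySem.List.index? xs k with
      | none => simp
      | some i =>
        simp only [Option.map_some, List.length_cons]
        show some _ = some _
        congr 1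
        push_cast
        ring

-- A's per-key value, as a function of the key alone
def pvVal (hp : List String) (k : String) : Int :=
  if ¬ (k ∈ hp) then 0
  else (hp.length : Int) - (((PySem.List.index? hp k).getD 0 : Nat) : Int)

-- the getD of a foldl-insert loop whose values depend only on the key
lemma getD_foldl_insert_keyval (f : String → Int) (ad : List (String × Int)) :
    ∀ (d : PySem.Dict String Int) (k : String),
    (ad.foldl (fun d kv => d.insert kv.1 (f kv.1)) d).getD k 0 =
      if k ∈ ad.map Prod.fst then f k else d.getD k 0 := by
  induction ad with
  | nil => intro d k; simp
  | cons kv rest ih =>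
    intro d k
    rw [List.foldl_cons, ih]
    by_cases hr : k ∈ rest.map Prod.fst
    · simp [hr]
    · by_cases hk : k = kv.1
      · subst hk
        simp [hr, PySem.Dict.getD_insert]
      · rw [if_neg hr]
        simp [PySem.Dict.getD_insert, hr, hk]

-- A's fold, with the branch pushed into the inserted value
lemma pv_foldA_eq (hp : List String) (ad : List (String × Int)) :
    (ad.foldl (fun d kv =>
        if ¬ (kv.1 ∈ hp) then d.insert kv.1 0
        else d.insert kv.1 ((hp.length : Int) - (((PySem.List.index? hp kv.1).getD 0 : Nat) : Int)))
      PySem.Dict.empty) =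
    (ad.foldl (fun d kv => d.insert kv.1 (pvVal hp kv.1)) PySem.Dict.empty) := by
  apply PySem.List.foldl_congr_mem
  intro d kv _
  unfold pvVal
  by_cases hm : kv.1 ∈ hp <;> simp [hm]

-- pointwise equality of the two result dicts' getD
lemma pv_getD_eq (hp : List String) (ad : List (String × Int)) (k : String) :
    (ad.foldl (fun d kv =>
        if ¬ (kv.1 ∈ hp) then d.insert kv.1 0
        else d.insert kv.1 ((hp.length : Int) - (((PySem.List.index? hp kv.1).getD 0 : Nat) : Int)))
      PySem.Dict.empty).getD k 0 =
    ((hp.reverse.foldl pvStep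
        (ad.foldl (fun d kv => d.insert kv.1 (0 : Int)) PySem.Dict.empty, 0)).1).getD k 0 := by
  rw [pv_foldA_eq, getD_foldl_insert_keyval, pvStep_getD]
  set d0 := ad.foldl (fun d kv => d.insert kv.1 (0 : Int)) PySem.Dict.empty with hd0
  have hd0c : ∀ j, d0.contains j = decide (j ∈ ad.map Prod.fst) := by
    intro j
    rw [hd0, PySem.Dict.contains_eq_decide_mem_keys,
        PySem.Dict.keys_foldl_insert_key (key := Prod.fst) (f := fun _ kv => (0 : Int))]
    simp only [PySem.Dict.keys_empty]
    congr 1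
    simp only [eq_iff_iff]
    rw [PySem.Set.mem_update]
    simp
  have hd0g : d0.getD k 0 = 0 := by
    rw [hd0, getD_foldl_insert_keyval (f := fun _ => (0 : Int))]
    simp [PySem.Dict.getD_empty]
  by_cases hmem : k ∈ ad.map Prod.fst
  · rw [if_pos hmem, if_pos (by rw [hd0c]; simp [hmem])]
    rw [pvLastRank_reverse]
    unfold pvVal
    by_cases hhp : k ∈ hp
    · cases hidx : PySem.List.index? hp k with
      | none => exact absurd ((PySem.List.index?_eq_none_iff hp k).mp hidx) (by simp [hhp])
      | some i =>
        simp [hhp]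
    · have hnone : List.idxOf? k hp = none := by
        simpa [PySem.List.index?_eq_idxOf?] using (PySem.List.index?_eq_none_iff hp k).mpr hhp
      simp [hhp, hd0g, hnone]
  · rw [if_neg hmem, if_neg (by rw [hd0c]; simp [hmem])]
    simp [PySem.Dict.getD_empty, hd0g]

-- keys of the two result dicts agree (both in ans_dict key order, Nodup)
lemma pv_keys_eq (hp : List String) (ad : List (String × Int)) :
    (ad.foldl (fun d kv =>
        if ¬ (kv.1 ∈ hp) then d.insert kv.1 0
        else d.insert kv.1 ((hp.length : Int) - (((PySem.List.index? hp kv.1).getD 0 : Nat) : Int)))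
      PySem.Dict.empty).keys =
    ((hp.reverse.foldl pvStep
        (ad.foldl (fun d kv => d.insert kv.1 (0 : Int)) PySem.Dict.empty, 0)).1).keys := by
  have hB : ∀ (l : List String) (d : PySem.Dict String Int) (r : Int),
      (l.foldl pvStep (d, r)).1.keys = d.keys := by
    intro l
    induction l with
    | nil => intro d r; rfl
    | cons x xs ih =>
      intro d r
      rw [List.foldl_cons,
          show pvStep (d, r) x = (if d.contains x then d.insert x (r + 1) else d, r + 1) from rfl]
      by_cases hx : d.contains x = true
      · rw [if_pos hx, ih, PySem.Dict.keys_insert_of_contains d _ hx]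
      · rw [if_neg (by simp [hx]), ih]
  rw [hB, pv_foldA_eq,
      PySem.Dict.keys_foldl_insert_key (key := Prod.fst)
        (f := fun _ kv => pvVal hp kv.1),
      PySem.Dict.keys_foldl_insert_key (key := Prod.fst) (f := fun _ kv => (0 : Int))]

lemma pv_nodupA (hp : List String) (ad : List (String × Int)) :
    (ad.foldl (fun d kv =>
        if ¬ (kv.1 ∈ hp) then d.insert kv.1 0
        else d.insert kv.1 ((hp.length : Int) - (((PySem.List.index? hp kv.1).getD 0 : Nat) : Int)))
      PySem.Dict.empty).keys.Nodup := by
  rw [pv_foldA_eq]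
  exact PySem.Dict.nodup_keys_foldl_insert_key ad Prod.fst
    (fun _ kv => pvVal hp kv.1) PySem.Dict.empty PySem.Dict.nodup_keys_empty

-- ===== VERDICT (by name: the statement is the Claim_ definition above) =====
theorem set_sort_order_spec : Claim_equal_set_sort_order := by
  intro ans_dict prior_rule _ _
  unfold Spec_set_sort_order set_sort_order set_sort_order_alt
  cases h : prior_rule.lookup "high_priority_label" with
  | none => rfl
  | some hp =>
    simp only []
    have hfold : (hp.reverse.foldl
        (fun (st : PySem.Dict String Int × Int) label =>
          (if st.1.contains label then st.1.insert label (st.2 + 1) else st.1, st.2 + 1))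
        (ans_dict.foldl (fun d kv => d.insert kv.1 (0 : Int)) PySem.Dict.empty, 0)) =
        (hp.reverse.foldl pvStep
        (ans_dict.foldl (fun d kv => d.insert kv.1 (0 : Int)) PySem.Dict.empty, 0)) := rfl
    rw [hfold]
    have hkeys := pv_keys_eq hp ans_dict
    have hndA := pv_nodupA hp ans_dict
    have hndB : ((hp.reverse.foldl pvStep
        (ans_dict.foldl (fun d kv => d.insert kv.1 (0 : Int)) PySem.Dict.empty, 0)).1).keys.Nodup := by
      rw [← hkeys]; exact hndA
    rw [PySem.Dict.items_eq_map_keys _ hndA 0,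
        PySem.Dict.items_eq_map_keys _ hndB 0, hkeys]
    apply List.map_congr_left
    intro k _
    rw [pv_getD_eq hp ans_dict k]
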